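-- pv_equiv track=rewrite | github.com/ShockleyJE/codesignal | Intro/level3/commonCharacterCount.py | solution
-- ===== SOURCE A (Python) =====
-- def solution(s1, s2):
--     s1_set, s2_set = set(s1), set(s2)
--     common_chars = s1_set.intersection(s2_set)
--     shrd_cntr = 0
--     import collections
--     from collections import Counter
--     s1_ctr = collections.Counter(s1)
--     s2_ctr = collections.Counter(s2)
--     for cc in common_chars:
--         shrd_cntr += min(s1_ctr[cc], s2_ctr[cc])
--     return shrd_cntr
-- ===== SOURCE B (Python) =====
-- def solution(s1, s2):
--     a = sorted(s1)
--     b = sorted(s2)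
--     i = j = n = 0
--     while i < len(a) and j < len(b):
--         if a[i] == b[j]:
--             n += 1
--             i += 1
--             j += 1
--         elif a[i] < b[j]:
--             i += 1
--         else:
--             j += 1
--     return n
-- ===== Notes on version B (the rewrite author's own statement) =====
-- stated objective: alternative
-- what changed: Replaces the set-intersection plus two Counters with sorting both strings and a two-pointer merge that counts one match per shared character occurrence.
import Mathlib
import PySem

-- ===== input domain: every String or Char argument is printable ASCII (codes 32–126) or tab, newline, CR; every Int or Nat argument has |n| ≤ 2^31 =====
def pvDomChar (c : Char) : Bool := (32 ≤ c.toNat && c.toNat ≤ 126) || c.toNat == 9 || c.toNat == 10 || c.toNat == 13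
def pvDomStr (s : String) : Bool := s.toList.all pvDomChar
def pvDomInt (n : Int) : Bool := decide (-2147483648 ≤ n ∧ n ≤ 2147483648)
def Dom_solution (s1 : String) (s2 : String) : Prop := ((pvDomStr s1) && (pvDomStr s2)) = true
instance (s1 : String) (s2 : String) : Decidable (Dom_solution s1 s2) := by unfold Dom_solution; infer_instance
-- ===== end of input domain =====

-- B replaces A's set-intersection + two Counters with sorting both strings and a
-- two-pointer merge counting one match per shared occurrence (alternative algorithm).

-- ===== PORT A =====
def solution (s1 : String) (s2 : String) : Int :=
  let s1_set := PySem.Set.ofList s1.toList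
  let s2_set := PySem.Set.ofList s2.toList
  let common_chars := PySem.Set.inter s1_set s2_set
  let shrd_cntr : Int := 0
  let s1_ctr := PySem.Dict.counter s1.toList
  let s2_ctr := PySem.Dict.counter s2.toList
  common_chars.foldl
    (fun acc cc => acc + min (s1_ctr.getD cc 0) (s2_ctr.getD cc 0)) shrd_cntr

-- ===== PORT B =====
-- the two-pointer while loop of Source B, as recursion on the two suffixes a[i:], b[j:]
def solMerge : List Char → List Char → Int
  | [], _ => 0
  | _ :: _, [] => 0
  | x :: xs, y :: ys =>
    if x = y then solMerge xs ys + 1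
    else if x < y then solMerge xs (y :: ys)
    else solMerge (x :: xs) ys
termination_by a b => a.length + b.length

def solution_alt (s1 : String) (s2 : String) : Int :=
  solMerge (PySem.List.sorted s1.toList (fun c => c) false)
           (PySem.List.sorted s2.toList (fun c => c) false)

-- ===== PRECONDITION & SPEC =====
def Spec_solution (s1 : String) (s2 : String) (out : Int) : Prop := out = solution_alt s1 s2
instance (s1 : String) (s2 : String) (out : Int) : Decidable (Spec_solution s1 s2 out) := by unfold Spec_solution; infer_instance

-- ===== CLAIM (what is proved, stated in full; the proofs are below) =====
def Claim_equal_solution : Prop := ∀ (s1 : String) (s2 : String), Dom_solution s1 s2 → Spec_solution s1 s2 (solution s1 s2)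

-- ===== LEMMAS AND PROOFS =====

-- dropping a head of the RIGHT list that occurs nowhere on the left keeps the intersection
theorem minter_cons_right {y : Char} (s t : Multiset Char) (h : y ∉ s) :
    s ∩ (y ::ₘ t) = s ∩ t := by
  ext c
  by_cases hc : c = y
  · subst hc
    simp [Multiset.count_inter, Multiset.count_eq_zero.mpr h]
  · simp [Multiset.count_inter, hc]

-- B's two-pointer merge on sorted lists computes the multiset-intersection cardinality.
theorem solMerge_eq_card : ∀ (a b : List Char), a.Pairwise (· ≤ ·) → b.Pairwise (· ≤ ·) →
    solMerge a b = (((a : Multiset Char) ∩ (b : Multiset Char)).card : Int) := by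
  intro a b
  induction a, b using solMerge.induct with
  | case1 b => intro _ _; simp [solMerge]
  | case2 x xs => intro _ _; simp [solMerge]
  | case3 xs y ys ih =>
    intro ha hb
    rw [show ((y :: xs : List Char) : Multiset Char) = y ::ₘ (xs : Multiset Char) from rfl,
      show ((y :: ys : List Char) : Multiset Char) = y ::ₘ (ys : Multiset Char) from rfl,
      Multiset.cons_inter_of_pos _ (by simp), Multiset.erase_cons_head]
    simp [solMerge, ih (List.Pairwise.of_cons ha) (List.Pairwise.of_cons hb)]
  | case4 x xs y ys hne hlt ih =>
    intro ha hb
    have hx : x ∉ (y :: ys : List Char) := by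
      intro hmem
      rcases List.mem_cons.mp hmem with h | h
      · exact hne h
      · exact absurd ((List.pairwise_cons.mp hb).1 x h) (not_le.mpr hlt)
    rw [show ((x :: xs : List Char) : Multiset Char) = x ::ₘ (xs : Multiset Char) from rfl,
      Multiset.cons_inter_of_neg _ (by simpa using hx)]
    simp [solMerge, hne, hlt, ih (List.Pairwise.of_cons ha) hb]
  | case5 x xs y ys hne hnlt ih =>
    intro ha hb
    have hyx : y < x := lt_of_le_of_ne (not_lt.mp hnlt) (Ne.symm hne)
    have hy : y ∉ (x :: xs : List Char) := by
      intro hmem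
      rcases List.mem_cons.mp hmem with h | h
      · exact hne h.symm
      · exact absurd ((List.pairwise_cons.mp ha).1 y h) (not_le.mpr hyx)
    rw [show ((y :: ys : List Char) : Multiset Char) = y ::ₘ (ys : Multiset Char) from rfl,
      minter_cons_right _ _ (by simpa using hy)]
    simp [solMerge, hne, hnlt, ih ha (List.Pairwise.of_cons hb)]

-- A's sum of min-multiplicities over the common characters is the same cardinality.
theorem solutionA_eq_card (l1 l2 : List Char) :
    (PySem.Set.inter (PySem.Set.ofList l1) (PySem.Set.ofList l2)).foldl
      (fun acc cc => acc + min ((PySem.Dict.counter l1).getD cc 0)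
        ((PySem.Dict.counter l2).getD cc 0)) 0
    = (((l1 : Multiset Char) ∩ (l2 : Multiset Char)).card : Int) := by
  set L := PySem.Set.inter (PySem.Set.ofList l1) (PySem.Set.ofList l2) with hL
  have hnodup : L.Nodup := by rw [hL]; exact PySem.Set.nodup_inter _ _ (PySem.Set.nodup_ofList l1)
  have hmem : ∀ c, c ∈ L ↔ c ∈ l1 ∧ c ∈ l2 := by
    intro c; rw [hL, PySem.Set.mem_inter]; simp [PySem.Set.mem_ofList]
  rw [PySem.List.foldl_add]
  simp only [PySem.Dict.getD_counter, zero_add]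
  have hfin : L.toFinset = ((l1 : Multiset Char) ∩ (l2 : Multiset Char)).toFinset := by
    ext c
    simp [List.mem_toFinset, Multiset.toFinset, hmem c]
  calc (L.map fun cc => min ((l1.count cc : Int)) ((l2.count cc : Int))).sum
      = L.toFinset.sum (fun cc => min ((l1.count cc : Int)) ((l2.count cc : Int))) :=
        (List.sum_toFinset _ hnodup).symm
    _ = (((l1 : Multiset Char) ∩ (l2 : Multiset Char)).card : Int) := by
        rw [hfin, ← Multiset.toFinset_sum_count_eq (((l1 : Multiset Char) ∩ (l2 : Multiset Char)))]
        push_cast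
        refine Finset.sum_congr rfl ?_
        intro c _
        rw [Multiset.count_inter]
        push_cast
        simp

-- ===== VERDICT (by name: the statement is the Claim_ definition above) =====
theorem solution_spec : Claim_equal_solution := by
  intro s1 s2 _
  show solution s1 s2 = solution_alt s1 s2
  rw [solution, solution_alt, solutionA_eq_card,
    solMerge_eq_card _ _ (by simpa using PySem.List.sorted_pairwise s1.toList (fun c => c))
      (by simpa using PySem.List.sorted_pairwise s2.toList (fun c => c)),
    Multiset.coe_eq_coe.mpr (PySem.List.sorted_perm s1.toList (fun c => c) false),
    Multiset.coe_eq_coe.mpr (PySem.List.sorted_perm s2.toList (fun c => c) false)]
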